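-- pv_equiv track=rewrite | github.com/galactic-src/advent-20-python | day23/day23.py | from1
-- ===== SOURCE A (Python) =====
-- def from1(cards):
--     ix = cards.index(1)
--     if ix == 0:
--         rotated = cards[1:]
--     elif ix == len(cards)-1:
--         rotated = cards[:-1]
--     else:
--         rotated = cards[ix+1:] + cards[:ix]
--     return "".join([str(i) for i in rotated])
-- ===== SOURCE B (Python) =====
-- def from1(cards):
--     found = False
--     before = []
--     after = []
--     for c in cards:
--         if not found and c == 1:
--             found = True
--         elif found:
--             after.append(c)
--         else:
--             before.append(c)
--     if not found:
--         raise ValueError("1 is not in list")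
--     return "".join(str(i) for i in after + before)
-- ===== Notes on version B (the rewrite author's own statement) =====
-- stated objective: alternative
-- what changed: Replaces the index()+three-way slice/concatenation decomposition by a single forward pass that partitions the cards around the first 1 into 'before' and 'after' lists while scanning, then joins after+before.
import Mathlib
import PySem

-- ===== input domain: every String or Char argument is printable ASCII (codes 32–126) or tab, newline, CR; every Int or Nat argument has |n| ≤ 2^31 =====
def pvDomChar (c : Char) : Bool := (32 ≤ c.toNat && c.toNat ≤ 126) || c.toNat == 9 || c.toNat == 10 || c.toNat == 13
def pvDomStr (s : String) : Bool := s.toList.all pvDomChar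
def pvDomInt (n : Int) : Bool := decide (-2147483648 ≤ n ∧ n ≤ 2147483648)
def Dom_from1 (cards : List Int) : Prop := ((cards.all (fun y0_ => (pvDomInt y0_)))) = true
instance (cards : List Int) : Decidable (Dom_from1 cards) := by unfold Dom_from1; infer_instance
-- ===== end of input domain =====

-- B changes the decomposition only (single partitioning pass instead of index+slices); equivalence on the return value, for inputs containing a 1.

-- ===== PORT A =====
-- cards.index(1) raises ValueError when 1 is absent: index? = none there, excluded by Pre_from1.
def from1 (cards : List Int) : String :=
  match PySem.List.index? cards (1 : Int) with
  | none => ""  -- ValueError in Python; outside Pre_from1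
  | some ix =>
    let rotated : List Int :=
      if ix = 0 then PySem.List.slice cards (some 1) none
      else if ix = cards.length - 1 then PySem.List.slice cards none (some (-1))
      else PySem.List.slice cards (some ((ix : Int) + 1)) none ++
           PySem.List.slice cards none (some (ix : Int))
    PySem.Str.join "" (rotated.map PySem.Int.toStr)

-- ===== PORT B =====
-- one loop step of B: state = (found, before, after)
def from1Step (st : Bool × List Int × List Int) (c : Int) : Bool × List Int × List Int :=
  let (found, before, after) := st
  if !found && c == 1 then (true, before, after)
  else if found then (found, before, after ++ [c])
  else (found, before ++ [c], after)

def from1_alt (cards : List Int) : String :=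
  match cards.foldl from1Step (false, [], []) with
  | (false, _, _) => ""  -- raise ValueError in Python; outside Pre_from1
  | (true, before, after) => PySem.Str.join "" ((after ++ before).map PySem.Int.toStr)

-- ===== PRECONDITION & SPEC =====
-- Pre_ excludes exactly the inputs without a 1, on which Python A raises ValueError (and B raises too).
def Pre_from1 (cards : List Int) : Prop := (1 : Int) ∈ cards
instance (cards : List Int) : Decidable (Pre_from1 cards) := by unfold Pre_from1; infer_instance
def pvWitness_from1 : List Int := [3, 1, 2]

def Spec_from1 (cards : List Int) (out : String) : Prop := out = from1_alt cards
instance (cards : List Int) (out : String) : Decidable (Spec_from1 cards out) := by unfold Spec_from1; infer_instance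

-- ===== CLAIM (what is proved, stated in full; the proofs are below) =====
def Claim_equal_from1 : Prop := ∀ (cards : List Int), Dom_from1 cards → Pre_from1 cards → Spec_from1 cards (from1 cards)

-- ===== LEMMAS AND PROOFS =====

-- once 'found' is true, every remaining card goes to 'after'
theorem from1Step_found (cards : List Int) (bef aft : List Int) :
    cards.foldl from1Step (true, bef, aft) = (true, bef, aft ++ cards) := by
  induction cards generalizing aft with
  | nil => simp
  | cons c cs ih => simp [from1Step, ih]

-- the fold, started before the 1 was found, lands on (true, take ix, drop (ix+1))
theorem from1Step_index (cards : List Int) (ix : Nat)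
    (h : PySem.List.index? cards (1 : Int) = some ix) (bef : List Int) :
    cards.foldl from1Step (false, bef, []) =
      (true, bef ++ cards.take ix, cards.drop (ix + 1)) := by
  induction cards generalizing ix bef with
  | nil => simp [PySem.List.index?] at h
  | cons c cs ih =>
    by_cases hc : c = 1
    · subst hc
      rw [PySem.List.index?_cons_self] at h
      obtain rfl : ix = 0 := by simpa using h.symm
      simp [List.foldl_cons, from1Step, from1Step_found]
    · rw [PySem.List.index?_cons_of_ne cs hc] at h
      obtain ⟨j, hj, rfl⟩ := Option.map_eq_some_iff.mp h
      have hstep : from1Step (false, bef, []) c = (false, bef ++ [c], []) := by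
        simp [from1Step, hc]
      rw [List.foldl_cons, hstep, ih j hj]
      simp [List.append_assoc]

-- A's three slice branches all compute drop (ix+1) ++ take ix
theorem rotated_eq (cards : List Int) (ix : Nat)
    (h : PySem.List.index? cards (1 : Int) = some ix) :
    (if ix = 0 then PySem.List.slice cards (some 1) none
     else if ix = cards.length - 1 then PySem.List.slice cards none (some (-1))
     else PySem.List.slice cards (some ((ix : Int) + 1)) none ++
          PySem.List.slice cards none (some (ix : Int))) =
    cards.drop (ix + 1) ++ cards.take ix := by
  obtain ⟨hk, -, -⟩ := PySem.List.getElem_of_index?_eq_some h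
  by_cases h0 : ix = 0
  · subst h0
    simp [PySem.List.slice_from_one, ← List.drop_one]
  · by_cases hl : ix = cards.length - 1
    · have hlen : ix + 1 = cards.length := by omega
      rw [if_neg h0, if_pos hl, PySem.List.slice_to_neg_one, hlen, List.drop_length,
        List.dropLast_eq_take, ← hl]
      simp
    · rw [if_neg h0, if_neg hl, PySem.List.slice_to_natCast,
        show ((ix : Int) + 1) = ((ix + 1 : Nat) : Int) by push_cast; ring,
        PySem.List.slice_from_natCast]

-- ===== VERDICT (by name: the statement is the Claim_ definition above) =====
theorem from1_spec : Claim_equal_from1 := by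
  intro cards _ hpre
  have hsome : (PySem.List.index? cards (1 : Int)).isSome := by
    rw [PySem.List.index?_isSome_iff]; exact hpre
  obtain ⟨ix, hix⟩ := Option.isSome_iff_exists.mp hsome
  unfold Spec_from1 from1 from1_alt
  rw [hix, from1Step_index cards ix hix []]
  show PySem.Str.join "" (List.map PySem.Int.toStr
      (if ix = 0 then PySem.List.slice cards (some 1) none
       else if ix = cards.length - 1 then PySem.List.slice cards none (some (-1))
       else PySem.List.slice cards (some ((ix : Int) + 1)) none ++
            PySem.List.slice cards none (some (ix : Int)))) =
    PySem.Str.join "" (List.map PySem.Int.toStr (cards.drop (ix + 1) ++ ([] ++ cards.take ix)))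
  rw [rotated_eq cards ix hix]
  simp
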